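-- pv_equiv track=rewrite | github.com/opengit/gitopenlib | gitopenlib/utils/basics.py | dict_extremum
-- ===== SOURCE A (Python) =====
-- from typing import Any, Dict, Iterable, List, Union, Tuple
--
-- def dict_extremum(data: dict, type=0) -> Tuple:
--     """
--     找到dict中value的极值，并返回由相应key组成的列表。
--
--     Args:
--         data:
--             dict数据，且value必须为数值类型。
--         type:
--             1表示执行最大值操作，0表示最小值操作。
--
--     Returns:
--         Union[int, float]:
--             极值。
--         List:
--             极值所在的key组成的List。
--     """
--     values = list(data.values())
--     if type == 1:
--         # 极大值
--         ex = max(values)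
--     elif type == 0:
--         # 极小值
--         ex = min(values)
--     else:
--         raise Exception("The value of 'type' should only be 0 or 1.")
--
--     # 拿到所有的key
--     keys_ = [k for k, v in data.items() if v == ex]
--
--     return ex, keys_
-- ===== SOURCE B (Python) =====
-- def dict_extremum(data: dict, type=0):
--     if type != 0 and type != 1:
--         raise Exception("The value of 'type' should only be 0 or 1.")
--     it = iter(data.items())
--     try:
--         k0, ex = next(it)
--     except StopIteration:
--         raise ValueError("dict_extremum() arg is an empty dict")
--     keys_ = [k0]
--     for k, v in it:
--         if (v > ex) if type == 1 else (v < ex):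
--             ex = v
--             keys_ = [k]
--         elif v == ex:
--             keys_.append(k)
--     return ex, keys_
-- ===== Notes on version B (the rewrite author's own statement) =====
-- stated objective: alternative
-- what changed: Replaces A's three passes (list(values), max/min scan, key-filter comprehension) by a single fold over items() that maintains the running extremum and the list of keys achieving it, resetting the key list on a new strict extremum.
import Mathlib
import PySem

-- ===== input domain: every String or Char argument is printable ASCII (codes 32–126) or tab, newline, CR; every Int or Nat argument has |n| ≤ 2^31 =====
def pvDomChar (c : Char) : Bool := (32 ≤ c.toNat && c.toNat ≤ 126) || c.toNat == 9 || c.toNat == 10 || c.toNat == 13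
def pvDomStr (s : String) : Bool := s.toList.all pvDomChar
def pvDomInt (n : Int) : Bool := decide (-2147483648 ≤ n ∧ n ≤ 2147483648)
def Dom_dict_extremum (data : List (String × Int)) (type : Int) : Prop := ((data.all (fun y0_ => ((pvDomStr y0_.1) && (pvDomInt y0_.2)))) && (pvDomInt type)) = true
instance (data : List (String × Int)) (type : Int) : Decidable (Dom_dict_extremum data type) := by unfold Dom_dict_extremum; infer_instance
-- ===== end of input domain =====

-- B merges A's three passes (values list, max/min scan, key filter) into one fold over the items;
-- equal on every nonempty dict with type ∈ {0, 1} (A raises outside that).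

-- ===== PORT A =====
def dict_extremum (data : List (String × Int)) (type : Int) : Int × List String :=
  let values := data.map Prod.snd
  let ex : Int :=
    if type = 1 then (PySem.List.max? values (fun y => y)).getD 0
    else if type = 0 then (PySem.List.min? values (fun y => y)).getD 0
    else 0  -- A raises Exception here: outside Pre_
  let keys_ := (data.filter (fun kv => kv.2 == ex)).map Prod.fst
  (ex, keys_)

-- ===== PORT B =====
def dict_extremum_alt (data : List (String × Int)) (type : Int) : Int × List String :=
  match data with
  | [] => (0, [])  -- B raises ValueError here: outside Pre_
  | (k0, v0) :: rest =>
    rest.foldl (fun st kv =>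
      if (if type = 1 then st.1 < kv.2 else kv.2 < st.1) then (kv.2, [kv.1])
      else if kv.2 = st.1 then (st.1, st.2 ++ [kv.1])
      else st) (v0, [k0])

-- ===== PRECONDITION & SPEC =====
-- exactly where A returns normally: max/min raise ValueError on an empty dict, and A raises Exception for type ∉ {0, 1}
def Pre_dict_extremum (data : List (String × Int)) (type : Int) : Prop :=
  data ≠ [] ∧ (type = 0 ∨ type = 1)
instance (data : List (String × Int)) (type : Int) : Decidable (Pre_dict_extremum data type) := by unfold Pre_dict_extremum; infer_instance

def pvWitness_dict_extremum : (List (String × Int)) × Int := ([("a", 3), ("b", 1), ("c", 1)], 0)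

def Spec_dict_extremum (data : List (String × Int)) (type : Int) (out : Int × List String) : Prop := out = dict_extremum_alt data type
instance (data : List (String × Int)) (type : Int) (out : Int × List String) : Decidable (Spec_dict_extremum data type out) := by unfold Spec_dict_extremum; infer_instance

-- ===== CLAIM (what is proved, stated in full; the proofs are below) =====
def Claim_equal_dict_extremum : Prop := ∀ (data : List (String × Int)) (type : Int), Dom_dict_extremum data type → Pre_dict_extremum data type → Spec_dict_extremum data type (dict_extremum data type)

-- ===== LEMMAS AND PROOFS =====

theorem le_foldl_max (l : List Int) (a : Int) : a ≤ l.foldl max a := by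
  induction l generalizing a with
  | nil => simp
  | cons x t ih => exact le_trans (le_max_left a x) (ih (max a x))

theorem foldl_min_le (l : List Int) (a : Int) : l.foldl min a ≤ a := by
  induction l generalizing a with
  | nil => simp
  | cons x t ih => exact le_trans (ih (min a x)) (min_le_left a x)

-- invariant of B's fold, max direction (type = 1)
theorem fold_inv_max (rest : List (String × Int)) :
    ∀ (ex : Int) (keys : List String),
    rest.foldl (fun st kv =>
      if st.1 < kv.2 then (kv.2, [kv.1])
      else if kv.2 = st.1 then (st.1, st.2 ++ [kv.1])
      else st) (ex, keys)
    = ((rest.map Prod.snd).foldl max ex,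
       (if (rest.map Prod.snd).foldl max ex = ex then keys else [])
         ++ (rest.filter (fun kv => kv.2 == (rest.map Prod.snd).foldl max ex)).map Prod.fst) := by
  induction rest with
  | nil => simp
  | cons hd t ih =>
    intro ex keys
    obtain ⟨k, v⟩ := hd
    simp only [List.foldl_cons, List.map_cons, List.filter_cons]
    by_cases hgt : ex < v
    · simp only [if_pos hgt]
      rw [ih v [k]]
      have hmax : max ex v = v := max_eq_right (le_of_lt hgt)
      have hge : v ≤ (t.map Prod.snd).foldl max v := le_foldl_max _ _
      have hne : (t.map Prod.snd).foldl max v ≠ ex := by omega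
      simp only [hmax]
      simp only [if_neg hne]
      by_cases hv : (t.map Prod.snd).foldl max v = v
      · simp [hv]
      · have : (v == (t.map Prod.snd).foldl max v) = false := by
          simp only [beq_eq_false_iff_ne, ne_eq]; omega
        simp [hv, this]
    · simp only [if_neg hgt]
      have hmax : max ex v = ex := max_eq_left (by omega)
      by_cases heq : v = ex
      · simp only [if_pos heq]
        rw [ih ex (keys ++ [k])]; simp only [hmax]
        by_cases hm : (t.map Prod.snd).foldl max ex = ex
        · simp [hm, heq]
        · have : (v == (t.map Prod.snd).foldl max ex) = false := by
            simp only [beq_eq_false_iff_ne, ne_eq, heq]; exact fun h => hm h.symm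
          simp [hm, this]
      · simp only [if_neg heq]
        rw [ih ex keys]; simp only [hmax]
        have hge : ex ≤ (t.map Prod.snd).foldl max ex := le_foldl_max _ _
        have : (v == (t.map Prod.snd).foldl max ex) = false := by
          simp only [beq_eq_false_iff_ne, ne_eq]; omega
        simp [this]

-- invariant of B's fold, min direction (type = 0)
theorem fold_inv_min (rest : List (String × Int)) :
    ∀ (ex : Int) (keys : List String),
    rest.foldl (fun st kv =>
      if kv.2 < st.1 then (kv.2, [kv.1])
      else if kv.2 = st.1 then (st.1, st.2 ++ [kv.1])
      else st) (ex, keys)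
    = ((rest.map Prod.snd).foldl min ex,
       (if (rest.map Prod.snd).foldl min ex = ex then keys else [])
         ++ (rest.filter (fun kv => kv.2 == (rest.map Prod.snd).foldl min ex)).map Prod.fst) := by
  induction rest with
  | nil => simp
  | cons hd t ih =>
    intro ex keys
    obtain ⟨k, v⟩ := hd
    simp only [List.foldl_cons, List.map_cons, List.filter_cons]
    by_cases hlt : v < ex
    · simp only [if_pos hlt]
      rw [ih v [k]]
      have hmin : min ex v = v := min_eq_right (le_of_lt hlt)
      have hle : (t.map Prod.snd).foldl min v ≤ v := foldl_min_le _ _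
      have hne : (t.map Prod.snd).foldl min v ≠ ex := by omega
      simp only [hmin]
      simp only [if_neg hne]
      by_cases hv : (t.map Prod.snd).foldl min v = v
      · simp [hv]
      · have : (v == (t.map Prod.snd).foldl min v) = false := by
          simp only [beq_eq_false_iff_ne, ne_eq]; omega
        simp [hv, this]
    · simp only [if_neg hlt]
      have hmin : min ex v = ex := min_eq_left (by omega)
      by_cases heq : v = ex
      · simp only [if_pos heq]
        rw [ih ex (keys ++ [k])]; simp only [hmin]
        by_cases hm : (t.map Prod.snd).foldl min ex = ex
        · simp [hm, heq]
        · have : (v == (t.map Prod.snd).foldl min ex) = false := by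
            simp only [beq_eq_false_iff_ne, ne_eq, heq]; exact fun h => hm h.symm
          simp [hm, this]
      · simp only [if_neg heq]
        rw [ih ex keys]; simp only [hmin]
        have hle : (t.map Prod.snd).foldl min ex ≤ ex := foldl_min_le _ _
        have : (v == (t.map Prod.snd).foldl min ex) = false := by
          simp only [beq_eq_false_iff_ne, ne_eq]; omega
        simp [this]

-- ===== VERDICT (by name: the statement is the Claim_ definition above) =====
theorem dict_extremum_spec : Claim_equal_dict_extremum := by
  intro data type _ hpre
  obtain ⟨hne, hty⟩ := hpre
  unfold Spec_dict_extremum dict_extremum dict_extremum_alt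
  cases data with
  | nil => exact absurd rfl hne
  | cons hd rest =>
    obtain ⟨k0, v0⟩ := hd
    rcases hty with h0 | h1
    · subst h0
      simp only [Int.reduceEq, reduceIte]
      rw [fold_inv_min rest v0 [k0]]
      simp only [List.map_cons, PySem.List.min?_id_cons, Option.getD_some, List.filter_cons]
      by_cases hm : (rest.map Prod.snd).foldl min v0 = v0
      · simp [hm]
      · have : (v0 == (rest.map Prod.snd).foldl min v0) = false := by
          simp only [beq_eq_false_iff_ne, ne_eq]; exact fun h => hm h.symm
        simp [hm, this]
    · subst h1
      simp only [Int.reduceEq, reduceIte]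
      rw [fold_inv_max rest v0 [k0]]
      simp only [List.map_cons, PySem.List.max?_id_cons, Option.getD_some, List.filter_cons]
      by_cases hm : (rest.map Prod.snd).foldl max v0 = v0
      · simp [hm]
      · have : (v0 == (rest.map Prod.snd).foldl max v0) = false := by
          simp only [beq_eq_false_iff_ne, ne_eq]; exact fun h => hm h.symm
        simp [hm, this]
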